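-- pv_equiv track=rewrite | github.com/Hou-Xiaoxuan/RFID_FMS | pysrc/Core_V_V5.py | splite_data
-- ===== SOURCE A (Python) =====
-- def splite_data(data, jump=4):
--     '''
--         fuction: 根据跳跃分割数据
--         parameter:
--             data  需要处理的数据
--             jump  数据发生跳跃的临界值
--         return value:
--             ct_list 去周期的相对高度列表
--             ct_loc  发生跳跃的位置列表
--     '''
--     ct = 0        # 当前phass的去周期高度
--     ct_list = []  # phass的去周期高度列表
--     ct_loc = []   # 发生跳跃的位置，左闭右开
--
--     for i in range(1, len(data)):
--         if data[i] - data[i - 1] < -jump: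
--             ct += 1
--             ct_list.append(ct)
--             ct_loc.append(i)
--         elif(data[i] - data[i - 1] > jump):
--             ct -= 1
--             ct_list.append(ct)
--             ct_loc.append(i)
--     return ct_list, ct_loc
-- ===== SOURCE B (Python) =====
-- def splite_data(data, jump=4):
--     # Divide and conquer: solve(lo, hi) returns, for jump positions i in [lo, hi),
--     # the relative-height list (starting from 0), the position list, and the total sign.
--     # Combining shifts the right half's heights by the left half's total.
--     def solve(lo, hi):
--         if hi <= lo:
--             return [], [], 0
--         if hi == lo + 1:
--             d = data[lo] - data[lo - 1]
--             if d < -jump: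
--                 return [1], [lo], 1
--             if d > jump:
--                 return [-1], [lo], -1
--             return [], [], 0
--         mid = (lo + hi) // 2
--         llist, lloc, lsig = solve(lo, mid)
--         rlist, rloc, rsig = solve(mid, hi)
--         return llist + [c + lsig for c in rlist], lloc + rloc, lsig + rsig
--     ct_list, ct_loc, _ = solve(1, len(data))
--     return ct_list, ct_loc
-- ===== Notes on version B (the rewrite author's own statement) =====
-- stated objective: alternative
-- what changed: A's single forward scan with an inline counter is replaced by a divide-and-conquer over the index range: each half returns its relative-height list, jump positions and total sign, and halves are merged by shifting the right half's heights by the left half's total.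
import Mathlib
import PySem

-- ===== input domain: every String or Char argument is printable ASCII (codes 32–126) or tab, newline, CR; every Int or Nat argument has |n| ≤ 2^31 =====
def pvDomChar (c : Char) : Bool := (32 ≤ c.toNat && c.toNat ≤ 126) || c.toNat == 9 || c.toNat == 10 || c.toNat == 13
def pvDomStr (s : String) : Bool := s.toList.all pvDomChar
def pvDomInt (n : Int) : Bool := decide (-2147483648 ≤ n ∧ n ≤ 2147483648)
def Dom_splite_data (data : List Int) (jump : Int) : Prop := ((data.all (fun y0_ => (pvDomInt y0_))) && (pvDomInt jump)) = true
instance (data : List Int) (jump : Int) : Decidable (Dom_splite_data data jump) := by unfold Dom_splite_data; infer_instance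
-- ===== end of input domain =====

-- B replaces A's single forward scan with an inline counter by a divide-and-conquer over the index
-- range that combines half-results by shifting the right half's heights; alternative decomposition,
-- same return value.

-- ===== PORT A =====
-- indices i and i-1 of the range loop are always in bounds, so data[i] is ported as pyGet? with default 0 (the default is never used)
def pvGet (data : List Int) (i : Int) : Int := (PySem.List.pyGet? data i).getD 0

def splite_data (data : List Int) (jump : Int) : List Int × List Int :=
  let st := (PySem.List.pyRange 1 (data.length : Int) 1).foldl
    (fun (st : Int × List Int × List Int) i =>
      let (ct, ct_list, ct_loc) := st
      if pvGet data i - pvGet data (i - 1) < -jump then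
        (ct + 1, ct_list ++ [ct + 1], ct_loc ++ [i])
      else if pvGet data i - pvGet data (i - 1) > jump then
        (ct - 1, ct_list ++ [ct - 1], ct_loc ++ [i])
      else st)
    (0, [], [])
  (st.2.1, st.2.2)

-- ===== PORT B =====
-- Source B's nested 'solve(lo, hi)': relative-height list, position list and total sign for jump
-- positions in [lo, hi), combined by shifting the right half's heights by the left half's total
def pvSolve (data : List Int) (jump : Int) (lo hi : Int) : List Int × List Int × Int :=
  if _hle : hi ≤ lo then ([], [], 0)
  else if _heq : hi = lo + 1 then
    let d := pvGet data lo - pvGet data (lo - 1)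
    if d < -jump then ([1], [lo], 1)
    else if d > jump then ([-1], [lo], -1)
    else ([], [], 0)
  else
    let mid := PySem.Int.floordiv (lo + hi) 2
    let l := pvSolve data jump lo mid
    let r := pvSolve data jump mid hi
    (l.1 ++ r.1.map (fun c => c + l.2.2), l.2.1 ++ r.2.1, l.2.2 + r.2.2)
termination_by (hi - lo).toNat
decreasing_by
  · simp [PySem.Int.floordiv, Int.fdiv_eq_ediv]; omega
  · simp [PySem.Int.floordiv, Int.fdiv_eq_ediv]; omega

def splite_data_alt (data : List Int) (jump : Int) : List Int × List Int :=
  let s := pvSolve data jump 1 (data.length : Int)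
  (s.1, s.2.1)

-- ===== PRECONDITION & SPEC =====
def Spec_splite_data (data : List Int) (jump : Int) (out : List Int × List Int) : Prop := out = splite_data_alt data jump
instance (data : List Int) (jump : Int) (out : List Int × List Int) : Decidable (Spec_splite_data data jump out) := by unfold Spec_splite_data; infer_instance

-- ===== CLAIM (what is proved, stated in full; the proofs are below) =====
def Claim_equal_splite_data : Prop := ∀ (data : List Int) (jump : Int), Dom_splite_data data jump → Spec_splite_data data jump (splite_data data jump)

-- ===== LEMMAS AND PROOFS =====
-- common specification: events of an ascending index list, processed front to back
def pvF (data : List Int) (jump : Int) : List Int → List Int × List Int × Int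
  | [] => ([], [], 0)
  | i :: L =>
    let r := pvF data jump L
    if pvGet data i - pvGet data (i - 1) < -jump then
      (1 :: r.1.map (fun c => c + 1), i :: r.2.1, 1 + r.2.2)
    else if pvGet data i - pvGet data (i - 1) > jump then
      (-1 :: r.1.map (fun c => c + -1), i :: r.2.1, -1 + r.2.2)
    else r

theorem pvF_append (data : List Int) (jump : Int) (L1 L2 : List Int) :
    pvF data jump (L1 ++ L2) =
      ((pvF data jump L1).1 ++ (pvF data jump L2).1.map (fun c => c + (pvF data jump L1).2.2),
       (pvF data jump L1).2.1 ++ (pvF data jump L2).2.1,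
       (pvF data jump L1).2.2 + (pvF data jump L2).2.2) := by
  induction L1 with
  | nil => simp [pvF]
  | cons i L1 ih =>
    by_cases h1 : pvGet data i - pvGet data (i - 1) < -jump
    · simp [pvF, h1, ih, List.map_map]
      constructor
      · intro x _; ring
      · ring
    · by_cases h2 : pvGet data i - pvGet data (i - 1) > jump
      · simp [pvF, h1, h2, ih, List.map_map]
        constructor
        · intro x _; ring
        · ring
      · simp [pvF, h1, h2, ih]

theorem pyRange_split (a b c : Int) (h1 : a ≤ b) (h2 : b ≤ c) :
    PySem.List.pyRange a c 1 = PySem.List.pyRange a b 1 ++ PySem.List.pyRange b c 1 := by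
  rw [PySem.List.pyRange_one a c, PySem.List.pyRange_one a b, PySem.List.pyRange_one b c]
  have hn : (c - a).toNat = (b - a).toNat + (c - b).toNat := by omega
  rw [hn, List.range_add, List.map_append, List.map_map]
  congr 1
  apply List.map_congr_left
  intro x hx
  simp only [Function.comp_apply]
  omega

theorem pvSolve_eq (data : List Int) (jump : Int) :
    ∀ (n : Nat) (lo hi : Int), (hi - lo).toNat = n →
      pvSolve data jump lo hi = pvF data jump (PySem.List.pyRange lo hi 1) := by
  intro n
  induction n using Nat.strong_induction_on with
  | _ n ih =>
    intro lo hi hn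
    rw [pvSolve]
    by_cases hle : hi ≤ lo
    · have : PySem.List.pyRange lo hi 1 = [] := by
        rw [PySem.List.pyRange_one]
        have : (hi - lo).toNat = 0 := by omega
        simp [this]
      simp [hle, this, pvF]
    · by_cases heq : hi = lo + 1
      · subst heq
        have h1 : PySem.List.pyRange lo (lo + 1) 1 = [lo] := by
          rw [PySem.List.pyRange_one_cons (by omega)]
          rw [PySem.List.pyRange_one]
          simp
        simp [hle, pvF]
      · have hlt : lo + 1 < hi := by omega
        have hmid : PySem.Int.floordiv (lo + hi) 2 = (lo + hi) / 2 := by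
          simp [PySem.Int.floordiv, Int.fdiv_eq_ediv]
        have hm1 : lo < (lo + hi) / 2 := by omega
        have hm2 : (lo + hi) / 2 < hi := by omega
        simp only [hle, heq, hmid]
        rw [ih ((lo + hi) / 2 - lo).toNat (by omega) lo ((lo + hi) / 2) rfl,
            ih (hi - (lo + hi) / 2).toNat (by omega) ((lo + hi) / 2) hi rfl,
            pyRange_split lo ((lo + hi) / 2) hi (by omega) (by omega),
            pvF_append]
        simp

theorem foldA_eq (data : List Int) (jump : Int) (L : List Int) :
    ∀ (ct : Int) (cl co : List Int),
    L.foldl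
      (fun (st : Int × List Int × List Int) i =>
        let (c, l, o) := st
        if pvGet data i - pvGet data (i - 1) < -jump then
          (c + 1, l ++ [c + 1], o ++ [i])
        else if pvGet data i - pvGet data (i - 1) > jump then
          (c - 1, l ++ [c - 1], o ++ [i])
        else st)
      (ct, cl, co)
    = (ct + (pvF data jump L).2.2,
       cl ++ (pvF data jump L).1.map (fun c => c + ct),
       co ++ (pvF data jump L).2.1) := by
  induction L with
  | nil => simp [pvF]
  | cons i L ihl =>
    intro ct cl co
    by_cases h1 : pvGet data i - pvGet data (i - 1) < -jump
    · simp only [List.foldl, h1, if_pos]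
      rw [ihl]
      simp [pvF, h1, List.map_map]
      refine ⟨by ring, ?_⟩
      constructor
      · ring
      · intro x _; ring
    · by_cases h2 : pvGet data i - pvGet data (i - 1) > jump
      · simp only [List.foldl, h1, h2]
        rw [ihl]
        simp [pvF, h1, h2, List.map_map]
        refine ⟨by ring, ?_, ?_⟩
        · ring
        · intro x _; ring
      · simp only [List.foldl]
        rw [if_neg h1, if_neg h2, ihl]
        simp [pvF, h1, h2]

-- ===== VERDICT (by name: the statement is the Claim_ definition above) =====
theorem splite_data_spec : Claim_equal_splite_data := by
  intro data jump _
  unfold Spec_splite_data splite_data splite_data_alt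
  rw [pvSolve_eq data jump ((data.length : Int) - 1).toNat 1 (data.length : Int) rfl]
  simp only [foldA_eq]
  simp
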